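-- pv_equiv track=rewrite | github.com/huyvan47/Tro_ly_Vat_tu_BMCVN_online | search-engine/rag/tag_filter.py | enforce_backbone_without_entity
-- ===== SOURCE A (Python) =====
-- def strip_entity_tags(tags):
--     return [t for t in tags if not str(t).startswith("entity:")]
--
-- def enforce_backbone_without_entity(must, anyt):
--     """
--     - Không dùng entity:*
--     - Nếu must rỗng, kéo 1 tag cụ thể từ anyt lên must theo thứ tự ưu tiên.
--     """
--     must = strip_entity_tags(must)
--     anyt = strip_entity_tags(anyt)
--
--     # Nếu must đã có tag cụ thể thì OK
--     if must:
--         return must, anyt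
--
--     # Thứ tự ưu tiên "xương sống"
--     priority_prefixes = (
--         "mechanisms",
--         "formula:",
--         "brand:",
--         "pest:",
--         "disease:",
--         "weed:",
--         "product:",
--         "chemical:",
--         "procedure:",
--         "registry:",   # nếu anh có nhóm này
--         # "crop:"       # thường KHÔNG nên làm backbone (rộng quá), nhưng có thể thêm nếu muốn
--     )
--
--     for prefix in priority_prefixes:
--         hit_idx = next((i for i, t in enumerate(anyt) if str(t).startswith(prefix)), None)
--         if hit_idx is not None:
--             hit = anyt.pop(hit_idx)
--             must.append(hit)
--             break
--
--     return must, anyt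
-- ===== SOURCE B (Python) =====
-- _PRIORITY = ("mechanisms", "formula:", "brand:", "pest:", "disease:", "weed:",
--              "product:", "chemical:", "procedure:", "registry:")
--
-- def _keep(tags):
--     return [t for t in tags if not str(t).startswith("entity:")]
--
-- def enforce_backbone_without_entity(must, anyt):
--     must = _keep(must)
--     anyt = _keep(anyt)
--     if must:
--         return must, anyt
--     # one pass over anyt: each tag gets the rank of the first priority prefix
--     # it starts with; the winner minimizes (rank, position)
--     cands = [(r, i)
--              for i, t in enumerate(anyt)
--              for r in (next((j for j, p in enumerate(_PRIORITY) if str(t).startswith(p)), None),)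
--              if r is not None]
--     if cands:
--         _, i = min(cands)
--         must.append(anyt.pop(i))
--     return must, anyt
-- ===== Notes on version B (the rewrite author's own statement) =====
-- stated objective: alternative
-- what changed: Replaces the prefix-outer short-circuit search (for each priority prefix, scan anyt for the first match, break on hit) by a single pass over anyt that assigns each tag the rank of the first prefix it matches and then selects the candidate minimizing (rank, position) with min.
import Mathlib
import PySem

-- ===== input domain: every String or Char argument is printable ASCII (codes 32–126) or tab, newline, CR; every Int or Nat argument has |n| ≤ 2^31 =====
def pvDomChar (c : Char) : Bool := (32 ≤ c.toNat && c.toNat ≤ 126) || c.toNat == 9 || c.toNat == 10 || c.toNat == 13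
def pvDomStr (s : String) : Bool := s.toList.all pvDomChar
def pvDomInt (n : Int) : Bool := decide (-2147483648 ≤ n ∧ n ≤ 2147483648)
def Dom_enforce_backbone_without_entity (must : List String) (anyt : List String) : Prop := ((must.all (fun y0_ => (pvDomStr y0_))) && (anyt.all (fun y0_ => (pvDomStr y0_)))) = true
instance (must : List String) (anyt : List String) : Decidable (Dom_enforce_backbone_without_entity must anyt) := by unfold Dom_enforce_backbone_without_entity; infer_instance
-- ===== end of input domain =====

-- B replaces A's prefix-outer short-circuit search by one pass over the tags
-- that ranks each tag and takes the (rank, position)-minimum (alternative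
-- decomposition, same asymptotic cost). Return values only (neither mutates
-- its caller's lists).

-- ===== PORT A =====
def pvStripEntityA (tags : List String) : List String :=
  tags.filter (fun t => !(PySem.Str.startswith t "entity:"))

def pvPriorityA : List String :=
  ["mechanisms", "formula:", "brand:", "pest:", "disease:", "weed:",
   "product:", "chemical:", "procedure:", "registry:"]

-- the 'for prefix in priority_prefixes' loop (break = return on hit)
def pvLoopA (must : List String) : List String → List String → List String × List String
  | [], anyt => (must, anyt)
  | pfx :: rest, anyt =>
    -- next((i for i, t in enumerate(anyt) if str(t).startswith(prefix)), None)
    match List.findIdx? (fun t => PySem.Str.startswith t pfx) anyt with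
    | some i =>
      match PySem.List.pop? anyt (Int.ofNat i) with
      | some (hit, anyt') => (must ++ [hit], anyt')
      | none => (must, anyt)   -- unreachable: i is a valid index
    | none => pvLoopA must rest anyt

def enforce_backbone_without_entity (must : List String) (anyt : List String) : List String × List String :=
  let must := pvStripEntityA must
  let anyt := pvStripEntityA anyt
  if must ≠ [] then (must, anyt)
  else pvLoopA must pvPriorityA anyt

-- ===== PORT B =====
def pvStripEntityB (tags : List String) : List String :=
  tags.filter (fun t => !(PySem.Str.startswith t "entity:"))

def pvPriorityB : List String :=
  ["mechanisms", "formula:", "brand:", "pest:", "disease:", "weed:",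
   "product:", "chemical:", "procedure:", "registry:"]

-- next((j for j, p in enumerate(_PRIORITY) if str(t).startswith(p)), None)
def pvRankB (t : String) : Option Nat :=
  List.findIdx? (fun p => PySem.Str.startswith t p) pvPriorityB

-- the candidate comprehension: (rank, index) for ranked tags, index-ordered
def pvCandsB (i : Nat) : List String → List (Nat × Nat)
  | [] => []
  | t :: ts =>
    match pvRankB t with
    | some r => (r, i) :: pvCandsB (i + 1) ts
    | none => pvCandsB (i + 1) ts

def enforce_backbone_without_entity_alt (must : List String) (anyt : List String) : List String × List String :=
  let must := pvStripEntityB must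
  let anyt := pvStripEntityB anyt
  if must ≠ [] then (must, anyt)
  else
    match PySem.List.min2? (pvCandsB 0 anyt) (·.1) (·.2) with
    | none => (must, anyt)
    | some (_, i) =>
      match PySem.List.pop? anyt (Int.ofNat i) with
      | some (hit, anyt') => (must ++ [hit], anyt')
      | none => (must, anyt)   -- unreachable: i is a valid index

-- ===== PRECONDITION & SPEC =====
def Spec_enforce_backbone_without_entity (must : List String) (anyt : List String) (out : List String × List String) : Prop := out = enforce_backbone_without_entity_alt must anyt
instance (must : List String) (anyt : List String) (out : List String × List String) : Decidable (Spec_enforce_backbone_without_entity must anyt out) := by unfold Spec_enforce_backbone_without_entity; infer_instance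

-- ===== CLAIM (what is proved, stated in full; the proofs are below) =====
def Claim_equal_enforce_backbone_without_entity : Prop := ∀ (must : List String) (anyt : List String), Dom_enforce_backbone_without_entity must anyt → Spec_enforce_backbone_without_entity must anyt (enforce_backbone_without_entity must anyt)

-- ===== LEMMAS AND PROOFS =====

-- candidates of B's pass, with ranks taken relative to an arbitrary prefix list P
def pvCandsG (P : List String) (i : Nat) : List String → List (Nat × Nat)
  | [] => []
  | t :: ts =>
    match List.findIdx? (fun p => PySem.Str.startswith t p) P with
    | some r => (r, i) :: pvCandsG P (i + 1) ts
    | none => pvCandsG P (i + 1) ts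

lemma pvCandsB_eq_G (i : Nat) (l : List String) : pvCandsB i l = pvCandsG pvPriorityB i l := by
  induction l generalizing i with
  | nil => rfl
  | cons t ts ih => simp [pvCandsB, pvCandsG, pvRankB, ih]

lemma pvCandsG_nil (i : Nat) (l : List String) : pvCandsG [] i l = [] := by
  induction l generalizing i with
  | nil => rfl
  | cons t ts ih => simp [pvCandsG, ih]

lemma pvCandsG_append (P : List String) (i : Nat) (l₁ l₂ : List String) :
    pvCandsG P i (l₁ ++ l₂) = pvCandsG P i l₁ ++ pvCandsG P (i + l₁.length) l₂ := by
  induction l₁ generalizing i with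
  | nil => simp [pvCandsG]
  | cons t ts ih =>
    simp only [List.cons_append, pvCandsG, ih]
    cases List.findIdx? (fun p => PySem.Str.startswith t p) P <;>
      simp [List.length_cons] <;> ring_nf

lemma pvCandsG_snd_ge (P : List String) (i : Nat) (l : List String) :
    ∀ c ∈ pvCandsG P i l, i ≤ c.2 := by
  induction l generalizing i with
  | nil => simp [pvCandsG]
  | cons t ts ih =>
    intro c hc
    simp only [pvCandsG] at hc
    cases h : List.findIdx? (fun p => PySem.Str.startswith t p) P <;> rw [h] at hc
    · exact le_trans (by omega) (ih (i + 1) c hc)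
    · rcases List.mem_cons.1 hc with h1 | h1
      · subst h1; simp
      · exact le_trans (by omega) (ih (i + 1) c h1)

-- step function of Python's min over (rank, index) pairs (first minimum wins)
def pvStep (acc : Option (Nat × Nat)) (x : Nat × Nat) : Option (Nat × Nat) :=
  match acc with
  | none => some x
  | some m => if (decide (x.1 < m.1) || (!decide (m.1 < x.1) && decide (x.2 < m.2))) then some x else some m

lemma min2_eq_foldl (l : List (Nat × Nat)) :
    PySem.List.min2? l (·.1) (·.2) = List.foldl pvStep none l := by
  unfold PySem.List.min2? pvStep
  congr 1
  funext acc x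
  cases acc <;> rfl

lemma pvCandsG_fst_pos (pfx : String) (P : List String) (i : Nat) (l : List String)
    (hl : ∀ t ∈ l, PySem.Str.startswith t pfx = false) :
    ∀ c ∈ pvCandsG (pfx :: P) i l, 1 ≤ c.1 := by
  induction l generalizing i with
  | nil => simp [pvCandsG]
  | cons t ts ih =>
    intro c hc
    have ht : PySem.Str.startswith t pfx = false := hl t (List.mem_cons_self ..)
    have hts : ∀ t' ∈ ts, PySem.Str.startswith t' pfx = false :=
      fun t' h' => hl t' (List.mem_cons_of_mem _ h')
    simp only [pvCandsG, List.findIdx?_cons, ht] at hc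
    simp only [Bool.false_eq_true, if_false] at hc
    cases h : List.findIdx? (fun p => PySem.Str.startswith t p) P <;> rw [h] at hc
    · exact ih (i + 1) hts c hc
    · simp only [Option.map_some] at hc
      rcases List.mem_cons.1 hc with h1 | h1
      · subst h1; simp
      · exact ih (i + 1) hts c h1

lemma pvCandsG_shift (pfx : String) (P : List String) (i : Nat) (l : List String)
    (hl : ∀ t ∈ l, PySem.Str.startswith t pfx = false) :
    pvCandsG (pfx :: P) i l = (pvCandsG P i l).map (fun c => (c.1 + 1, c.2)) := by
  induction l generalizing i with
  | nil => simp [pvCandsG]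
  | cons t ts ih =>
    have ht : PySem.Str.startswith t pfx = false := hl t (List.mem_cons_self ..)
    have hts : ∀ t' ∈ ts, PySem.Str.startswith t' pfx = false :=
      fun t' h' => hl t' (List.mem_cons_of_mem _ h')
    simp only [pvCandsG, List.findIdx?_cons, ht, Bool.false_eq_true, if_false]
    cases h : List.findIdx? (fun p => PySem.Str.startswith t p) P <;>
      simp [ih (i + 1) hts]

lemma foldl_pvStep_map_shift (l : List (Nat × Nat)) (acc : Option (Nat × Nat)) :
    List.foldl (fun a c => pvStep a (c.1 + 1, c.2)) (acc.map (fun c => (c.1 + 1, c.2))) l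
      = (List.foldl pvStep acc l).map (fun c => (c.1 + 1, c.2)) := by
  induction l generalizing acc with
  | nil => rfl
  | cons c cs ih =>
    have hstep : pvStep (acc.map (fun c => (c.1 + 1, c.2))) (c.1 + 1, c.2)
        = (pvStep acc c).map (fun c => (c.1 + 1, c.2)) := by
      cases acc with
      | none => rfl
      | some m =>
        simp only [Option.map_some, pvStep, Nat.add_lt_add_iff_right]
        split <;> simp
    simpa [hstep] using ih (pvStep acc c)

lemma min2_shift (l : List (Nat × Nat)) :
    PySem.List.min2? (l.map (fun c => (c.1 + 1, c.2))) (·.1) (·.2)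
      = (PySem.List.min2? l (·.1) (·.2)).map (fun c => (c.1 + 1, c.2)) := by
  rw [min2_eq_foldl, min2_eq_foldl, List.foldl_map]
  simpa using foldl_pvStep_map_shift l none

lemma foldl_pvStep_keep (m : Nat × Nat) (post : List (Nat × Nat))
    (hpost : ∀ c ∈ post, m.1 ≤ c.1 ∧ (c.1 = m.1 → m.2 ≤ c.2)) :
    List.foldl pvStep (some m) post = some m := by
  induction post with
  | nil => rfl
  | cons c cs ih =>
    have hc := hpost c (List.mem_cons_self ..)
    have hstep : pvStep (some m) c = some m := by
      simp only [pvStep]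
      have : ¬ (c.1 < m.1 ∨ (¬ m.1 < c.1 ∧ c.2 < m.2)) := by omega
      split
      · rename_i hcond
        exfalso
        rcases Bool.or_eq_true_iff.1 hcond with h1 | h1
        · exact this (Or.inl (of_decide_eq_true h1))
        · rcases Bool.and_eq_true_iff.1 h1 with ⟨h2, h3⟩
          exact this (Or.inr ⟨fun hlt => by simp [decide_eq_true hlt] at h2,
            of_decide_eq_true h3⟩)
      · rfl
    rw [List.foldl_cons, hstep]
    exact ih (fun c' h' => hpost c' (List.mem_cons_of_mem _ h'))

lemma foldl_pvStep_pre (m : Nat × Nat) (post : List (Nat × Nat)) :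
    ∀ (pre : List (Nat × Nat)) (acc : Option (Nat × Nat)),
      (∀ b, acc = some b → m.1 < b.1) → (∀ c ∈ pre, m.1 < c.1) →
      List.foldl pvStep acc (pre ++ m :: post) = List.foldl pvStep (some m) post := by
  intro pre
  induction pre with
  | nil =>
    intro acc hacc _
    have hstep : pvStep acc m = some m := by
      cases acc with
      | none => rfl
      | some b =>
        have hb := hacc b rfl
        simp [pvStep, decide_eq_true hb]
    simp [hstep]
  | cons c cs ih =>
    intro acc hacc hpre
    have hc : m.1 < c.1 := hpre c (List.mem_cons_self ..)
    have hacc' : ∀ b, pvStep acc c = some b → m.1 < b.1 := by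
      intro b hb
      cases acc with
      | none => simp only [pvStep] at hb; injection hb with h; subst h; exact hc
      | some a =>
        have ha := hacc a rfl
        simp only [pvStep] at hb
        split at hb <;> (injection hb with h; subst h)
        · exact hc
        · exact ha
    simpa using ih (pvStep acc c) hacc' (fun c' h' => hpre c' (List.mem_cons_of_mem _ h'))

lemma min2_split (pre post : List (Nat × Nat)) (m : Nat × Nat)
    (hpre : ∀ c ∈ pre, m.1 < c.1)
    (hpost : ∀ c ∈ post, m.1 ≤ c.1 ∧ (c.1 = m.1 → m.2 ≤ c.2)) :
    PySem.List.min2? (pre ++ m :: post) (·.1) (·.2) = some m := by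
  rw [min2_eq_foldl, foldl_pvStep_pre m post pre none (by simp) hpre,
    foldl_pvStep_keep m post hpost]

lemma pvMain (P : List String) (must anyt : List String) :
    pvLoopA must P anyt =
      (match PySem.List.min2? (pvCandsG P 0 anyt) (·.1) (·.2) with
       | none => (must, anyt)
       | some (_, i) =>
         match PySem.List.pop? anyt (Int.ofNat i) with
         | some (hit, anyt') => (must ++ [hit], anyt')
         | none => (must, anyt)) := by
  induction P with
  | nil => simp [pvLoopA, pvCandsG_nil, PySem.List.min2?]
  | cons pfx rest ih =>
    cases h : List.findIdx? (fun t => PySem.Str.startswith t pfx) anyt with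
    | none =>
      have hl : ∀ t ∈ anyt, PySem.Str.startswith t pfx = false :=
        List.findIdx?_eq_none_iff.1 h
      simp only [pvLoopA, h, ih, pvCandsG_shift pfx rest 0 anyt hl, min2_shift]
      cases o : PySem.List.min2? (pvCandsG rest 0 anyt) (·.1) (·.2) with
      | none => rfl
      | some c => rfl
    | some i =>
      obtain ⟨hlen, hx, hprev⟩ := List.findIdx?_eq_some_iff_getElem.1 h
      have hdecomp : anyt = anyt.take i ++ anyt[i] :: anyt.drop (i + 1) := by
        conv_lhs => rw [← List.take_append_drop i anyt]
        rw [List.getElem_cons_drop]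
      have htake : ∀ t ∈ anyt.take i, PySem.Str.startswith t pfx = false := by
        intro t ht
        obtain ⟨j, hj, hje⟩ := List.mem_take_iff_getElem.1 ht
        subst hje
        simpa using hprev j (by omega)
      have hc : pvCandsG (pfx :: rest) 0 anyt
          = pvCandsG (pfx :: rest) 0 (anyt.take i)
            ++ (0, i) :: pvCandsG (pfx :: rest) (i + 1) (anyt.drop (i + 1)) := by
        conv_lhs => rw [hdecomp]
        rw [pvCandsG_append]
        simp only [List.length_take, Nat.zero_add, Nat.min_eq_left (Nat.le_of_lt hlen)]
        simp only [pvCandsG, List.findIdx?_cons, hx, if_true]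
      have hmin : PySem.List.min2? (pvCandsG (pfx :: rest) 0 anyt) (·.1) (·.2) = some (0, i) := by
        rw [hc]
        apply min2_split
        · exact fun c hcm => pvCandsG_fst_pos pfx rest 0 (anyt.take i) htake c hcm
        · intro c hcm
          have := pvCandsG_snd_ge (pfx :: rest) (i + 1) (anyt.drop (i + 1)) c hcm
          exact ⟨Nat.zero_le _, fun _ => by omega⟩
      simp only [pvLoopA, h, hmin]

-- ===== VERDICT (by name: the statement is the Claim_ definition above) =====
theorem enforce_backbone_without_entity_spec : Claim_equal_enforce_backbone_without_entity := by
  intro must anyt _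
  show _ = _
  unfold enforce_backbone_without_entity enforce_backbone_without_entity_alt
  have hs : pvStripEntityA = pvStripEntityB := rfl
  have hp : pvPriorityA = pvPriorityB := rfl
  simp only [hs]
  split
  · rfl
  · rw [pvMain, pvCandsB_eq_G, hp]
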